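-- pv_equiv track=rewrite | github.com/hryxx86/GNN-Testing | process_news.py | split_articles
-- ===== SOURCE A (Python) =====
-- from typing import List, Tuple
--
-- def split_articles(text: str) -> List[Tuple[str, str]]:
--     """
--     Split the plaintext into articles by 'Document <ID>'.
--     Returns list of (doc_id, article_text).
--     """
--     articles: List[Tuple[str, str]] = []
--     current_lines: List[str] = []
--     doc_id: str = ""
--     for line in text.splitlines():
--         stripped = line.strip()
--         if stripped.startswith("Document "):
--             parts = stripped.split()
--             doc_id = parts[1] if len(parts) > 1 else ""
--             article_text = "\n".join(l for l in current_lines if l.strip())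
--             if article_text:
--                 articles.append((doc_id, article_text))
--             current_lines = []
--             doc_id = ""
--         else:
--             current_lines.append(stripped)
--     # last article
--     article_text = "\n".join(l for l in current_lines if l.strip())
--     if article_text:
--         articles.append((doc_id, article_text))
--     return articles
-- ===== SOURCE B (Python) =====
-- from typing import List, Tuple
--
-- def split_articles(text: str) -> List[Tuple[str, str]]:
--     """
--     Split the plaintext into articles by 'Document <ID>'.
--     Index-table decomposition: strip all lines once, collect the marker
--     positions, then cut the stripped line list into slices between markers.
--     """
--     lines = [l.strip() for l in text.splitlines()]
--     markers = [(i, s) for i, s in enumerate(lines) if s.startswith("Document ")]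
--     out: List[Tuple[str, str]] = []
--     prev = 0
--     for i, s in markers:
--         block = "\n".join(l for l in lines[prev:i] if l)
--         if block:
--             parts = s.split()
--             out.append((parts[1] if len(parts) > 1 else "", block))
--         prev = i + 1
--     tail = "\n".join(l for l in lines[prev:] if l)
--     if tail:
--         out.append(("", tail))
--     return out
-- ===== Notes on version B (the rewrite author's own statement) =====
-- stated objective: alternative
-- what changed: Replaced A's accumulate-and-flush state machine (current_lines buffer + doc_id flag mutated per line) with an index-table decomposition: strip all lines once, build the list of marker positions with enumerate, then cut the stripped line list into slices between consecutive markers and a tail slice.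
import Mathlib
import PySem

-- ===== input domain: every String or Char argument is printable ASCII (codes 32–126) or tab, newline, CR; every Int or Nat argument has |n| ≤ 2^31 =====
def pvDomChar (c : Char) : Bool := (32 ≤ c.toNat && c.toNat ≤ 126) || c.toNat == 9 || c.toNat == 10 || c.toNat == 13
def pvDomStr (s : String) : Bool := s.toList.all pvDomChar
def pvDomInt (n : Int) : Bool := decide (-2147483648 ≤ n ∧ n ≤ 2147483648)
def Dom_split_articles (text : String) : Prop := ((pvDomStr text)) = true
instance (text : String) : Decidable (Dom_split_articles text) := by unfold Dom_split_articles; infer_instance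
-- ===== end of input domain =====

-- B replaces A's accumulate-and-flush state machine by an index-table decomposition
-- (strip all lines once, list the marker positions, slice between markers); same cost,
-- proved to return the same value on every input.


-- shared trivial helpers: the marker test and the 'parts[1] if len(parts) > 1 else ""' id extraction
def pvMarker (s : String) : Bool := PySem.Str.startswith s "Document "
def pvDocId (s : String) : String :=
  let parts := PySem.Str.split₀ s
  if 1 < parts.length then parts[1]! else ""

-- ===== PORT A =====
-- A's loop body on the already-stripped line (branch order as in the Python)
def stepA2 (st : List (String × String) × List String × String) (s : String) :
    List (String × String) × List String × String :=
  if pvMarker s then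
    let article_text := PySem.Str.join "\n" (st.2.1.filter (fun l => PySem.Str.strip l ≠ ""))
    ((if article_text ≠ "" then st.1 ++ [(pvDocId s, article_text)] else st.1), [], "")
  else
    (st.1, st.2.1 ++ [s], st.2.2)

def stepA (st : List (String × String) × List String × String) (line : String) :
    List (String × String) × List String × String :=
  stepA2 st (PySem.Str.strip line)

def split_articles (text : String) : List (String × String) :=
  let fin := (PySem.Str.splitlines text).foldl stepA ([], [], "")
  let article_text := PySem.Str.join "\n" (fin.2.1.filter (fun l => PySem.Str.strip l ≠ ""))
  if article_text ≠ "" then fin.1 ++ [(fin.2.2, article_text)] else fin.1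

-- ===== PORT B =====
-- B's loop body over the marker table: state = (out, prev)
def stepB (lines : List String) (st : List (String × String) × Int) (p : Int × String) :
    List (String × String) × Int :=
  let block := PySem.Str.join "\n" ((PySem.List.slice lines (some st.2) (some p.1)).filter (fun l => l ≠ ""))
  ((if block ≠ "" then st.1 ++ [(pvDocId p.2, block)] else st.1), p.1 + 1)

def split_articles_alt (text : String) : List (String × String) :=
  let lines := (PySem.Str.splitlines text).map PySem.Str.strip
  let markers := (PySem.List.enumerate lines).filter (fun p => pvMarker p.2)
  let st := markers.foldl (stepB lines) ([], 0)
  let tail := PySem.Str.join "\n" ((PySem.List.slice lines (some st.2) none).filter (fun l => l ≠ ""))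
  if tail ≠ "" then st.1 ++ [("", tail)] else st.1

-- ===== PRECONDITION & SPEC =====
def Spec_split_articles (text : String) (out : List (String × String)) : Prop := out = split_articles_alt text
instance (text : String) (out : List (String × String)) : Decidable (Spec_split_articles text out) := by unfold Spec_split_articles; infer_instance

-- ===== CLAIM (what is proved, stated in full; the proofs are below) =====
def Claim_equal_split_articles : Prop := ∀ (text : String), Dom_split_articles text → Spec_split_articles text (split_articles text)

-- ===== LEMMAS AND PROOFS =====

-- strip is idempotent
lemma rstrip_prefix (y : List Char) : PySem.Chars.rstrip y <+: y := by
  have hsuf : y.reverse.dropWhile PySem.Chars.isspace <:+ y.reverse := List.dropWhile_suffix _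
  have : (PySem.Chars.rstrip y).reverse <:+ y.reverse := by
    simpa [PySem.Chars.rstrip] using hsuf
  exact List.reverse_suffix.mp this

lemma lstrip_rstrip_lstrip (s : List Char) :
    PySem.Chars.lstrip (PySem.Chars.rstrip (PySem.Chars.lstrip s)) = PySem.Chars.rstrip (PySem.Chars.lstrip s) := by
  have hpre := rstrip_prefix (PySem.Chars.lstrip s)
  rcases hz : PySem.Chars.rstrip (PySem.Chars.lstrip s) with _ | ⟨a, t⟩
  · simp [PySem.Chars.lstrip]
  · rw [hz] at hpre
    rcases hpre with ⟨r, hr⟩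
    have hy : PySem.Chars.lstrip s = a :: (t ++ r) := by simpa using hr.symm
    have ha : PySem.Chars.isspace a = false := by
      cases h' : PySem.Chars.isspace a
      · rfl
      · exfalso
        have hidem : List.dropWhile PySem.Chars.isspace (PySem.Chars.lstrip s) = PySem.Chars.lstrip s :=
          List.dropWhile_idempotent _ _
        rw [hy, List.dropWhile_cons_of_pos h'] at hidem
        have h1 := List.length_dropWhile_le PySem.Chars.isspace (t ++ r)
        have h2 := congrArg List.length hidem
        rw [List.length_cons] at h2
        omega
    show PySem.Chars.lstrip (a :: t) = a :: t
    simp only [PySem.Chars.lstrip]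
    exact List.dropWhile_cons_of_neg (by simp [ha])

lemma chars_strip_idem (s : List Char) :
    PySem.Chars.strip (PySem.Chars.strip s) = PySem.Chars.strip s := by
  simp only [PySem.Chars.strip]
  rw [lstrip_rstrip_lstrip]
  simp [PySem.Chars.rstrip, List.dropWhile_idempotent]

lemma strip_idem (s : String) : PySem.Str.strip (PySem.Str.strip s) = PySem.Str.strip s := by
  have h : (PySem.Str.strip (PySem.Str.strip s)).toList = (PySem.Str.strip s).toList := by
    simp [chars_strip_idem]
  exact String.toList_inj.mp h

-- B's algorithm on an already-stripped list of lines
def Bcore (ls : List String) : List (String × String) :=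
  let markers := (PySem.List.enumerate ls).filter (fun p => pvMarker p.2)
  let st := markers.foldl (stepB ls) ([], 0)
  let tail := PySem.Str.join "\n" ((PySem.List.slice ls (some st.2) none).filter (fun l => l ≠ ""))
  if tail ≠ "" then st.1 ++ [("", tail)] else st.1

-- A's flush of the final state
def finA (st : List (String × String) × List String × String) : List (String × String) :=
  let t := PySem.Str.join "\n" (st.2.1.filter (fun l => PySem.Str.strip l ≠ ""))
  if t ≠ "" then st.1 ++ [(st.2.2, t)] else st.1

-- enumerate facts
lemma enumerate_fst_ge {α : Type} (xs : List α) (s : Int) :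
    ∀ p ∈ PySem.List.enumerate xs s, s ≤ p.1 := by
  induction xs generalizing s with
  | nil => simp [PySem.List.enumerate_nil]
  | cons x xs ih =>
    intro p hp
    rw [PySem.List.enumerate_cons] at hp
    rcases List.mem_cons.1 hp with rfl | hp'
    · simp
    · have := ih (s+1) p hp'; omega

lemma enumerate_append_shift {α : Type} (xs ys : List α) (s : Int) :
    PySem.List.enumerate (xs ++ ys) s
      = PySem.List.enumerate xs s ++ (PySem.List.enumerate ys (s + xs.length)) := by
  induction xs generalizing s with
  | nil => simp [PySem.List.enumerate_nil]
  | cons x xs ih =>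
    simp [PySem.List.enumerate_cons, ih (s+1)]
    ring_nf

lemma enumerate_start_shift {α : Type} (xs : List α) (s : Int) :
    PySem.List.enumerate xs s = (PySem.List.enumerate xs 0).map (fun p => (p.1 + s, p.2)) := by
  induction xs generalizing s with
  | nil => simp [PySem.List.enumerate_nil]
  | cons x xs ih =>
    rw [PySem.List.enumerate_cons, PySem.List.enumerate_cons, ih (0+1), ih (s+1)]
    simp [List.map_map]
    intro a b _; ring

lemma filter_marker_enumerate_nil (cur : List String) (s : Int)
    (h : ∀ x ∈ cur, pvMarker x = false) :
    (PySem.List.enumerate cur s).filter (fun p => pvMarker p.2) = [] := by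
  induction cur generalizing s with
  | nil => simp [PySem.List.enumerate_nil]
  | cons x xs ih =>
    rw [PySem.List.enumerate_cons]
    simp [h x (by simp)]
    intro a b hb
    have hbx : b ∈ xs := by
      have := List.mem_map_of_mem (f := Prod.snd) hb
      rwa [PySem.List.map_snd_enumerate] at this
    exact h b (by simp [hbx])

-- what one stepB appends
def pvDelta (L : List String) (k : Int) (p : Int × String) : List (String × String) :=
  let block := PySem.Str.join "\n" ((PySem.List.slice L (some k) (some p.1)).filter (fun l => l ≠ ""))
  if block ≠ "" then [(pvDocId p.2, block)] else []

lemma stepB_eq (L : List String) (out : List (String × String)) (k : Int) (p : Int × String) :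
    stepB L (out, k) p = (out ++ pvDelta L k p, p.1 + 1) := by
  simp only [stepB, pvDelta]
  split_ifs <;> simp

lemma foldB_out (L : List String) (M : List (Int × String)) (out : List (String × String)) (k : Int) :
    M.foldl (stepB L) (out, k)
      = (out ++ (M.foldl (stepB L) ([], k)).1, (M.foldl (stepB L) ([], k)).2) := by
  induction M generalizing out k with
  | nil => simp
  | cons p M ih =>
    rw [List.foldl_cons, List.foldl_cons, stepB_eq L out k p, stepB_eq L [] k p]
    rw [ih (out ++ pvDelta L k p) (p.1 + 1)]
    simp only [List.nil_append]
    rw [ih (pvDelta L k p) (p.1 + 1)]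
    simp [List.append_assoc]

lemma foldB_prev_nonneg (L : List String) (M : List (Int × String))
    (hM : ∀ p ∈ M, 0 ≤ p.1) (out : List (String × String)) (k : Int) (hk : 0 ≤ k) :
    0 ≤ (M.foldl (stepB L) (out, k)).2 := by
  induction M generalizing out k with
  | nil => simpa
  | cons p M ih =>
    simp only [List.foldl_cons, stepB]
    exact ih (fun q hq => hM q (by simp [hq])) _ _ (by have := hM p (by simp); omega)

lemma pvDelta_shift (pre xs : List String) (k : Int) (p : Int × String) (hk : 0 ≤ k) (hp : 0 ≤ p.1) :
    pvDelta (pre ++ xs) (k + (pre.length : Int)) (p.1 + (pre.length : Int), p.2) = pvDelta xs k p := by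
  have hs : PySem.List.slice (pre ++ xs) (some (k + (pre.length : Int))) (some (p.1 + (pre.length : Int)))
      = PySem.List.slice xs (some k) (some p.1) := by
    rw [PySem.List.slice_toNat _ (by omega) (by omega), PySem.List.slice_toNat _ hk hp]
    have h1 : (k + (pre.length : Int)).toNat = pre.length + k.toNat := by omega
    have h2 : (p.1 + (pre.length : Int)).toNat - (k + (pre.length : Int)).toNat = p.1.toNat - k.toNat := by omega
    rw [h2, h1, List.drop_length_add_append]
  simp only [pvDelta, hs]

lemma foldB_shift (pre xs : List String) (M : List (Int × String))
    (hM : ∀ p ∈ M, 0 ≤ p.1) (out : List (String × String)) (k : Int) (hk : 0 ≤ k) :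
    (M.map (fun p => (p.1 + (pre.length : Int), p.2))).foldl (stepB (pre ++ xs)) (out, k + (pre.length : Int))
      = ((M.foldl (stepB xs) (out, k)).1, (M.foldl (stepB xs) (out, k)).2 + (pre.length : Int)) := by
  induction M generalizing out k with
  | nil => simp
  | cons p M ih =>
    simp only [List.map_cons, List.foldl_cons]
    rw [stepB_eq, stepB_eq]
    have hp := hM p (by simp)
    rw [pvDelta_shift pre xs k p hk hp]
    have harr : (p.1 + (pre.length : Int), p.2).1 + 1 = (p.1 + 1) + (pre.length : Int) := by simp; ring
    rw [harr]
    exact ih (fun q hq => hM q (by simp [hq])) (out ++ pvDelta xs k p) (p.1 + 1) (by omega)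

-- Bcore on a marker-free list is the tail flush
lemma Bcore_nomarker (cur : List String) (h : ∀ x ∈ cur, pvMarker x = false) :
    Bcore cur = (if PySem.Str.join "\n" (cur.filter (fun l => l ≠ "")) ≠ ""
                 then [("", PySem.Str.join "\n" (cur.filter (fun l => l ≠ "")))] else []) := by
  simp only [Bcore]
  rw [filter_marker_enumerate_nil cur 0 h]
  simp [PySem.List.slice_from cur (by norm_num : (0:Int) ≤ 0)]

-- peeling the first marker off Bcore
lemma Bcore_split (cur : List String) (l : String) (ls : List String)
    (hc : ∀ x ∈ cur, pvMarker x = false) (hl : pvMarker l = true) :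
    Bcore (cur ++ l :: ls)
      = (if PySem.Str.join "\n" (cur.filter (fun x => x ≠ "")) ≠ ""
         then [(pvDocId l, PySem.Str.join "\n" (cur.filter (fun x => x ≠ "")))] else []) ++ Bcore ls := by
  have hM : ∀ p ∈ (PySem.List.enumerate ls).filter (fun p => pvMarker p.2), 0 ≤ p.1 :=
    fun p hp => enumerate_fst_ge ls 0 p (List.mem_of_mem_filter hp)
  have hmk : (PySem.List.enumerate (cur ++ l :: ls)).filter (fun p => pvMarker p.2)
      = (((cur.length : Int)), l) ::
        ((PySem.List.enumerate ls).filter (fun p => pvMarker p.2)).map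
          (fun p => (p.1 + ((cur.length : Int) + 1), p.2)) := by
    rw [enumerate_append_shift cur (l :: ls) 0, List.filter_append,
        filter_marker_enumerate_nil cur 0 hc, List.nil_append,
        PySem.List.enumerate_cons,
        enumerate_start_shift ls (0 + (cur.length : Int) + 1),
        List.filter_cons_of_pos (by simpa using hl),
        List.filter_map]
    have hcomp : ((fun p : Int × String => pvMarker p.2) ∘
        (fun p : Int × String => (p.1 + (0 + (cur.length : Int) + 1), p.2)))
        = (fun p : Int × String => pvMarker p.2) := rfl
    rw [hcomp]
    simp
  have hslice : PySem.List.slice (cur ++ l :: ls) (some 0) (some ((cur.length : Int))) = cur := by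
    rw [PySem.List.slice_toNat _ le_rfl (by positivity)]
    simp
  have hdelta : pvDelta (cur ++ l :: ls) 0 (((cur.length : Int)), l)
      = (if PySem.Str.join "\n" (cur.filter (fun x => x ≠ "")) ≠ ""
         then [(pvDocId l, PySem.Str.join "\n" (cur.filter (fun x => x ≠ "")))] else []) := by
    simp only [pvDelta, hslice]
  have hL : cur ++ l :: ls = (cur ++ [l]) ++ ls := by simp
  have hlen : ((cur ++ [l]).length : Int) = (cur.length : Int) + 1 := by simp
  have hfold : ((((cur.length : Int)), l) ::
        ((PySem.List.enumerate ls).filter (fun p => pvMarker p.2)).map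
          (fun p => (p.1 + ((cur.length : Int) + 1), p.2))).foldl (stepB (cur ++ l :: ls)) ([], 0)
      = (pvDelta (cur ++ l :: ls) 0 (((cur.length : Int)), l)
           ++ (((PySem.List.enumerate ls).filter (fun p => pvMarker p.2)).foldl (stepB ls) ([], 0)).1,
         (((PySem.List.enumerate ls).filter (fun p => pvMarker p.2)).foldl (stepB ls) ([], 0)).2
           + ((cur.length : Int) + 1)) := by
    rw [List.foldl_cons, stepB_eq, List.nil_append]
    have hsh := foldB_shift (cur ++ [l]) ls ((PySem.List.enumerate ls).filter (fun p => pvMarker p.2))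
      hM (pvDelta (cur ++ l :: ls) 0 (((cur.length : Int)), l)) 0 le_rfl
    rw [hlen, ← hL] at hsh
    simp only [zero_add] at hsh
    rw [hsh]
    rw [foldB_out ls _ (pvDelta (cur ++ l :: ls) 0 (((cur.length : Int)), l)) 0]
  have hq := foldB_prev_nonneg ls ((PySem.List.enumerate ls).filter (fun p => pvMarker p.2)) hM [] 0 le_rfl
  have htail : PySem.List.slice (cur ++ l :: ls)
        (some ((((PySem.List.enumerate ls).filter (fun p => pvMarker p.2)).foldl (stepB ls) ([], 0)).2
               + ((cur.length : Int) + 1))) none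
      = PySem.List.slice ls
        (some ((((PySem.List.enumerate ls).filter (fun p => pvMarker p.2)).foldl (stepB ls) ([], 0)).2)) none := by
    rw [PySem.List.slice_from _ (by omega), PySem.List.slice_from _ hq]
    have h1 : ((((PySem.List.enumerate ls).filter (fun p => pvMarker p.2)).foldl (stepB ls) ([], 0)).2
        + ((cur.length : Int) + 1)).toNat
        = (cur ++ [l]).length
          + (((PySem.List.enumerate ls).filter (fun p => pvMarker p.2)).foldl (stepB ls) ([], 0)).2.toNat := by
      simp; omega
    rw [h1, hL, List.drop_length_add_append]
  simp only [Bcore]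
  rw [hmk, hfold, htail, hdelta]
  split_ifs <;> simp

-- main invariant: A's flush of the fold equals acc ++ Bcore (pending ++ rest)
lemma mainA (ls : List String) (cur : List String) (acc : List (String × String))
    (hcur : ∀ x ∈ cur, PySem.Str.strip x = x ∧ pvMarker x = false)
    (hls : ∀ x ∈ ls, PySem.Str.strip x = x) :
    finA (ls.foldl stepA2 (acc, cur, "")) = acc ++ Bcore (cur ++ ls) := by
  induction ls generalizing cur acc with
  | nil =>
    have hfil : cur.filter (fun x => PySem.Str.strip x ≠ "") = cur.filter (fun x => x ≠ "") :=
      List.filter_congr (fun x hx => by simp [(hcur x hx).1])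
    rw [List.foldl_nil, List.append_nil, Bcore_nomarker cur (fun x hx => (hcur x hx).2)]
    simp only [finA, hfil]
    split_ifs <;> simp
  | cons l ls ih =>
    rw [List.foldl_cons]
    cases hml : pvMarker l with
    | false =>
      have hsl : PySem.Str.strip l = l := hls l (by simp)
      have hstep : stepA2 (acc, cur, "") l = (acc, cur ++ [l], "") := by
        simp [stepA2, hml]
      rw [hstep, ih (cur ++ [l]) acc
        (by intro x hx
            rcases List.mem_append.1 hx with hx' | hx'
            · exact hcur x hx'
            · simp at hx'; subst hx'; exact ⟨hsl, hml⟩)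
        (fun x hx => hls x (by simp [hx]))]
      simp [List.append_assoc]
    | true =>
      have hfil : cur.filter (fun x => PySem.Str.strip x ≠ "") = cur.filter (fun x => x ≠ "") :=
        List.filter_congr (fun x hx => by simp [(hcur x hx).1])
      have hstep : stepA2 (acc, cur, "") l
          = ((if PySem.Str.join "\n" (cur.filter (fun x => x ≠ "")) ≠ ""
              then acc ++ [(pvDocId l, PySem.Str.join "\n" (cur.filter (fun x => x ≠ "")))] else acc), [], "") := by
        have hfil' : List.filter (fun x => !decide (PySem.Str.strip x = "")) cur
            = List.filter (fun x => !decide (x = "")) cur :=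
          List.filter_congr (fun x hx => by simp [(hcur x hx).1])
        simp only [stepA2, hml, if_true]
        simp
        rw [hfil']
      rw [hstep, ih [] _ (by intro x hx; cases hx) (fun x hx => hls x (by simp [hx]))]
      rw [List.nil_append, Bcore_split cur l ls (fun x hx => (hcur x hx).2) hml]
      split_ifs <;> simp [List.append_assoc]

-- ===== VERDICT (by name: the statement is the Claim_ definition above) =====
theorem split_articles_spec : Claim_equal_split_articles := by
  intro text _
  unfold Spec_split_articles
  show split_articles text = split_articles_alt text
  have h1 : split_articles text = finA ((PySem.Str.splitlines text).foldl stepA ([], [], "")) := rfl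
  have h2 : split_articles_alt text = Bcore ((PySem.Str.splitlines text).map PySem.Str.strip) := rfl
  rw [h1, h2]
  have h3 : (PySem.Str.splitlines text).foldl stepA ([], [], "")
      = ((PySem.Str.splitlines text).map PySem.Str.strip).foldl stepA2 ([], [], "") := by
    rw [List.foldl_map]; rfl
  rw [h3]
  have := mainA ((PySem.Str.splitlines text).map PySem.Str.strip) [] []
    (by intro x hx; cases hx) (by intro x hx; rcases List.mem_map.1 hx with ⟨y, _, rfl⟩; exact strip_idem y)
  simpa using this
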